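-- pv_equiv track=rewrite | github.com/J-Subhradeep/Binary-Search-striver | Minimum Number of Days to Make m Bouquets.py | possibleToMakeBouquets
-- ===== SOURCE A (Python) =====
-- def possibleToMakeBouquets(arr,day,m,k):
--
--     count = 0
--     no_of_bouquets = 0
--     for i in arr:
--         if i<=day:
--             count+=1
--         else:
--             no_of_bouquets += count//k
--             count = 0
--     no_of_bouquets += count//k
--     if no_of_bouquets>=m: return True
--     return False
-- ===== SOURCE B (Python) =====
-- def possibleToMakeBouquets(arr, day, m, k):
--     # barrier-index method: record the positions of unbloomed flowers, then each
--     # maximal bloomed run is the gap between consecutive barriers; sum gap//k.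
--     barriers = [i for i, x in enumerate(arr) if x > day]
--     bounds = [-1] + barriers + [len(arr)]
--     total = sum((b - a - 1) // k for a, b in zip(bounds, bounds[1:]))
--     return total >= m
-- ===== Notes on version B (the rewrite author's own statement) =====
-- stated objective: alternative
-- what changed: B first materialises the list of indices of unbloomed flowers (barriers), pads it with -1 and len(arr), and sums (b-a-1)//k over adjacent pairs of that index list, instead of A's single element-wise scan threading a reset counter with a trailing flush.
import Mathlib
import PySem

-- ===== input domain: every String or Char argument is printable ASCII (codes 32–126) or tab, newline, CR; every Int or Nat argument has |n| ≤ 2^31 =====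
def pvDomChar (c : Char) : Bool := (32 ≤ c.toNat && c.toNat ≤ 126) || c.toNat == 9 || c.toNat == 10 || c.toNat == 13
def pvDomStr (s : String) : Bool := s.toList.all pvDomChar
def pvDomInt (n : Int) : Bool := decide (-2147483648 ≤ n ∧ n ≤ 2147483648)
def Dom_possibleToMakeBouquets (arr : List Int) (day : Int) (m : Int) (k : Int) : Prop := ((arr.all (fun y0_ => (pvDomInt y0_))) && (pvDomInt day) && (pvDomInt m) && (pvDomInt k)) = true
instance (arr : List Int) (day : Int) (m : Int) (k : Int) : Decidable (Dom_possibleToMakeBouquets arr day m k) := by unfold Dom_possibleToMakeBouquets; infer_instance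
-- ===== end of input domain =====

-- B records the indices of unbloomed flowers and sums (b-a-1)//k over adjacent pairs of that
-- padded index list, instead of A's element-wise scan with a reset counter; alternative, same cost.

-- ===== PORT A =====
def possibleToMakeBouquets (arr : List Int) (day : Int) (m : Int) (k : Int) : Bool :=
  let s := arr.foldl (fun (s : Int × Int) i =>
    if i ≤ day then (s.1 + 1, s.2)
    else (0, s.2 + PySem.Int.floordiv s.1 k)) (0, 0)
  let nb := s.2 + PySem.Int.floordiv s.1 k
  if nb ≥ m then true else false

-- ===== PORT B =====
def possibleToMakeBouquets_alt (arr : List Int) (day : Int) (m : Int) (k : Int) : Bool :=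
  let barriers := ((PySem.List.enumerate arr 0).filter (fun p => decide (day < p.2))).map (fun p => p.1)
  let bounds := [(-1 : Int)] ++ barriers ++ [(arr.length : Int)]
  let total := ((bounds.zip (bounds.drop 1)).map (fun p => PySem.Int.floordiv (p.2 - p.1 - 1) k)).sum
  decide (total ≥ m)

-- ===== PRECONDITION & SPEC =====
-- Pre_ excludes k = 0, on which Python's '//' raises ZeroDivisionError in both programs.
def Pre_possibleToMakeBouquets (arr : List Int) (day : Int) (m : Int) (k : Int) : Prop := k ≠ 0
instance (arr : List Int) (day : Int) (m : Int) (k : Int) : Decidable (Pre_possibleToMakeBouquets arr day m k) := by unfold Pre_possibleToMakeBouquets; infer_instance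
def pvWitness_possibleToMakeBouquets : List Int × Int × Int × Int := ([1, 3, 2, 7, 2], 3, 2, 2)

def Spec_possibleToMakeBouquets (arr : List Int) (day : Int) (m : Int) (k : Int) (out : Bool) : Prop := out = possibleToMakeBouquets_alt arr day m k
instance (arr : List Int) (day : Int) (m : Int) (k : Int) (out : Bool) : Decidable (Spec_possibleToMakeBouquets arr day m k out) := by unfold Spec_possibleToMakeBouquets; infer_instance

-- ===== CLAIM (what is proved, stated in full; the proofs are below) =====
def Claim_equal_possibleToMakeBouquets : Prop := ∀ (arr : List Int) (day : Int) (m : Int) (k : Int), Dom_possibleToMakeBouquets arr day m k → Pre_possibleToMakeBouquets arr day m k → Spec_possibleToMakeBouquets arr day m k (possibleToMakeBouquets arr day m k)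

-- ===== LEMMAS AND PROOFS =====

-- A's loop as structural recursion over the list, carrying only the pending counter
def pvLoopA (day k : Int) : List Int → Int → Int
  | [], c => PySem.Int.floordiv c k
  | x :: xs, c =>
    if x ≤ day then pvLoopA day k xs (c + 1)
    else PySem.Int.floordiv c k + pvLoopA day k xs 0

theorem pvFoldl_eq_loopA (day k : Int) (l : List Int) (c nb : Int) :
    (let s := l.foldl (fun (s : Int × Int) i =>
        if i ≤ day then (s.1 + 1, s.2)
        else (0, s.2 + PySem.Int.floordiv s.1 k)) (c, nb)
     s.2 + PySem.Int.floordiv s.1 k) = nb + pvLoopA day k l c := by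
  induction l generalizing c nb with
  | nil => simp [pvLoopA]
  | cons x xs ih =>
    by_cases h : x ≤ day
    · simp only [List.foldl_cons, if_pos h, pvLoopA, ih]
    · simp only [List.foldl_cons, if_neg h, pvLoopA, ih]; ring

-- sum over adjacent pairs of a boundary list
def pvPairSum (k : Int) : List Int → Int
  | a :: b :: rest => PySem.Int.floordiv (b - a - 1) k + pvPairSum k (b :: rest)
  | _ => 0

theorem pvZipSum_eq_pairSum (k : Int) (l : List Int) :
    ((l.zip (l.drop 1)).map (fun p => PySem.Int.floordiv (p.2 - p.1 - 1) k)).sum = pvPairSum k l := by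
  induction l with
  | nil => simp [pvPairSum]
  | cons a rest ih =>
    cases rest with
    | nil => simp [pvPairSum]
    | cons b r =>
      simp only [List.drop_succ_cons, List.drop_zero, List.zip_cons_cons, List.map_cons,
        List.sum_cons, pvPairSum]
      rw [← ih]
      simp

-- indices (start-based) of the unbloomed flowers
def pvBarIdx (day : Int) (start : Int) : List Int → List Int
  | [] => []
  | x :: xs => if day < x then start :: pvBarIdx day (start + 1) xs else pvBarIdx day (start + 1) xs

theorem pvEnumFilter_eq_barIdx (day : Int) (l : List Int) (s : Int) :
    ((PySem.List.enumerate l s).filter (fun p => decide (day < p.2))).map (fun p => p.1)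
      = pvBarIdx day s l := by
  induction l generalizing s with
  | nil => simp [PySem.List.enumerate_nil, pvBarIdx]
  | cons x xs ih =>
    by_cases h : day < x <;>
      simp [PySem.List.enumerate_cons, h, pvBarIdx, ih]

theorem pvPairSum_eq_loopA (day k : Int) (l : List Int) :
    ∀ prev start : Int,
      pvPairSum k (prev :: pvBarIdx day start l ++ [start + l.length]) =
        pvLoopA day k l (start - prev - 1) := by
  induction l with
  | nil => intro prev start; simp [pvBarIdx, pvPairSum, pvLoopA]
  | cons x xs ih =>
    intro prev start
    by_cases h : day < x
    · have hx : ¬ x ≤ day := by omega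
      have := ih start (start + 1)
      simp only [pvBarIdx, if_pos h, pvLoopA, if_neg hx, List.length_cons]
      have hlen : start + ((xs.length : Int) + 1) = (start + 1) + xs.length := by ring
      calc pvPairSum k (prev :: start :: pvBarIdx day (start + 1) xs ++ [start + ((xs.length : Int) + 1)])
          = PySem.Int.floordiv (start - prev - 1) k +
              pvPairSum k (start :: pvBarIdx day (start + 1) xs ++ [(start + 1) + (xs.length : Int)]) := by
            rw [hlen]; rfl
        _ = PySem.Int.floordiv (start - prev - 1) k + pvLoopA day k xs 0 := by
            rw [ih start (start + 1)]; norm_num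
    · have hx : x ≤ day := by omega
      have := ih prev (start + 1)
      simp only [pvBarIdx, if_neg h, pvLoopA, if_pos hx, List.length_cons]
      push_cast
      have hlen : start + ((xs.length : Int) + 1) = (start + 1) + xs.length := by ring
      rw [hlen, ih prev (start + 1)]
      congr 1; ring

-- ===== VERDICT (by name: the statement is the Claim_ definition above) =====
theorem possibleToMakeBouquets_spec : Claim_equal_possibleToMakeBouquets := by
  intro arr day m k _ _
  unfold Spec_possibleToMakeBouquets possibleToMakeBouquets possibleToMakeBouquets_alt
  dsimp only
  rw [pvFoldl_eq_loopA day k arr 0 0, pvZipSum_eq_pairSum, pvEnumFilter_eq_barIdx]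
  have h0 : ((-1 : Int) :: pvBarIdx day 0 arr ++ [(arr.length : Int)]) =
      ((-1 : Int) :: pvBarIdx day 0 arr ++ [(0 : Int) + arr.length]) := by norm_num
  rw [show ([(-1 : Int)] ++ pvBarIdx day 0 arr ++ [(arr.length : Int)]) =
      ((-1 : Int) :: pvBarIdx day 0 arr ++ [(arr.length : Int)]) from rfl, h0,
    pvPairSum_eq_loopA day k arr (-1) 0]
  norm_num
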